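-- pv_equiv track=rewrite | github.com/pypi-data/pypi-mirror-20 | packages/wikitcms/wikitcms-1.12.1.tar.gz/wikitcms-1.12.1/wikitcms/helpers.py | triplet_sort
-- ===== SOURCE A (Python) =====
-- MILESTONE_PAIRS = (
--     ('Rawhide', 'f100'),
--     # These two are kinda the same, we called Branched nightly pages
--     # 'Nightly' in F21 cycle
--     ('Branched', 'f150'),
--     ('Nightly', 'f150'),
--     ('Pre-Alpha', 'f175'),
--     ('Alpha', 'f200'),
--     ('Pre-Beta', 'f375'),
--     ('Beta', 'f400'),
--     ('Preview', 'f600'),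
--     ('Pre-Final', 'f775'),
--     ('Final', 'f800'),
-- )
--
-- COMPOSE_PAIRS = (
--     ('TC', '200'),
--     ('RC', '600'),
-- )
--
-- def triplet_sort(release, milestone, compose):
--     """Just like fedora_release_sort, but requires you to pass the
--     now-'standard' release, milestone, compose triplet of inputs.
--     This is a better way in most cases as you're going to have more
--     certainty about instantiating wikitcms/fedfind objects from it,
--     plus we can handle things like '23' being higher than '23 Beta'
--     or '23 Final TC1'.
--     """
--     for (orig, repl) in MILESTONE_PAIRS:
--         milestone = milestone.replace(orig, repl)
--         if not milestone:
--             # ('23', 'Final', '') == ('23', '', '')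
--             milestone = 'f800'
--     for (orig, repl) in COMPOSE_PAIRS:
--         compose = compose.replace(orig, repl)
--         if not compose:
--             compose = '999'
--     return (release, milestone, compose)
-- ===== SOURCE B (Python) =====
-- # Single left-to-right scan with ordered alternation instead of ten sequential
-- # full-string replace passes; empty-string sentinels applied once up front.
--
-- MILESTONE_PAIRS = (
--     ('Rawhide', 'f100'),
--     ('Branched', 'f150'),
--     ('Nightly', 'f150'),
--     ('Pre-Alpha', 'f175'),
--     ('Alpha', 'f200'),
--     ('Pre-Beta', 'f375'),
--     ('Beta', 'f400'),
--     ('Preview', 'f600'),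
--     ('Pre-Final', 'f775'),
--     ('Final', 'f800'),
-- )
--
-- COMPOSE_PAIRS = (
--     ('TC', '200'),
--     ('RC', '600'),
-- )
--
--
-- def _sub_all(s, pairs):
--     """One pass over s: at each position try the pairs in order; on a match
--     emit the replacement and skip the matched key, else copy the character."""
--     out = []
--     i = 0
--     n = len(s)
--     while i < n:
--         for orig, repl in pairs:
--             if s.startswith(orig, i):
--                 out.append(repl)
--                 i += len(orig)
--                 break
--         else:
--             out.append(s[i])
--             i += 1
--     return ''.join(out)
--
--
-- def triplet_sort(release, milestone, compose):
--     milestone = _sub_all(milestone, MILESTONE_PAIRS) if milestone else 'f800'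
--     compose = _sub_all(compose, COMPOSE_PAIRS) if compose else '999'
--     return (release, milestone, compose)
-- ===== Notes on version B (the rewrite author's own statement) =====
-- stated objective: alternative
-- what changed: Replaces the sequence of ten (resp. two) full-string str.replace passes with a single left-to-right scan that tries the keys in order at each position (ordered alternation) and applies the empty-string sentinels once up front instead of inside the loop.
import Mathlib
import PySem

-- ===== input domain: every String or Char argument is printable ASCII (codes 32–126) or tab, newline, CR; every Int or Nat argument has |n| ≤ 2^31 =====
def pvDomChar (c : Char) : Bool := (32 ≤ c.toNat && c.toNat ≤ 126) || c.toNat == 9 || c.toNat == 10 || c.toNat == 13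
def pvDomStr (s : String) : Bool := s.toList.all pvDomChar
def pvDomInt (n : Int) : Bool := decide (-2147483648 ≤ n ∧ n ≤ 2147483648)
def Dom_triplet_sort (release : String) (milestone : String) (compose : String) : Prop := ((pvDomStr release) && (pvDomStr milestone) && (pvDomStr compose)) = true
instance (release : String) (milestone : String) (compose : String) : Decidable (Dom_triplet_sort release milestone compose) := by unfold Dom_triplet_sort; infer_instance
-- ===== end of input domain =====

-- B replaces the sequence of full-string str.replace passes by ONE left-to-right scan
-- trying the keys in tuple order at each position (objective: alternative algorithm).

-- ===== PORT A =====
def pvMilestonePairs : List (String × String) :=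
  [("Rawhide", "f100"), ("Branched", "f150"), ("Nightly", "f150"),
   ("Pre-Alpha", "f175"), ("Alpha", "f200"), ("Pre-Beta", "f375"),
   ("Beta", "f400"), ("Preview", "f600"), ("Pre-Final", "f775"), ("Final", "f800")]

def pvComposePairs : List (String × String) := [("TC", "200"), ("RC", "600")]

def triplet_sort (release : String) (milestone : String) (compose : String) :
    String × String × String :=
  let m := pvMilestonePairs.foldl (fun m pr =>
    let m := PySem.Str.replace m pr.1 pr.2
    if m = "" then "f800" else m) milestone
  let c := pvComposePairs.foldl (fun c pr =>
    let c := PySem.Str.replace c pr.1 pr.2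
    if c = "" then "999" else c) compose
  (release, m, c)

-- ===== PORT B =====
def pvMilestonePairsC : List (List Char × List Char) :=
  pvMilestonePairs.map (fun pr => (pr.1.toList, pr.2.toList))

def pvComposePairsC : List (List Char × List Char) :=
  pvComposePairs.map (fun pr => (pr.1.toList, pr.2.toList))

-- Source B's _sub_all: one pass; at each position try the pairs in order (Python's
-- `i += len(orig)` is written `t.drop (pr.1.length - 1)` on the tail for termination;
-- identical for the nonempty keys used).
def pvScan (ps : List (List Char × List Char)) : List Char → List Char
  | [] => []
  | c :: t =>
    match ps.find? (fun pr => pr.1.isPrefixOf (c :: t)) with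
    | some pr => pr.2 ++ pvScan ps (t.drop (pr.1.length - 1))
    | none => c :: pvScan ps t
termination_by s => s.length
decreasing_by all_goals simp; try omega

def triplet_sort_alt (release : String) (milestone : String) (compose : String) :
    String × String × String :=
  let m := if milestone = "" then "f800"
           else String.ofList (pvScan pvMilestonePairsC milestone.toList)
  let c := if compose = "" then "999"
           else String.ofList (pvScan pvComposePairsC compose.toList)
  (release, m, c)

-- ===== PRECONDITION & SPEC =====
def Spec_triplet_sort (release : String) (milestone : String) (compose : String) (out : String × String × String) : Prop := out = triplet_sort_alt release milestone compose
instance (release : String) (milestone : String) (compose : String) (out : String × String × String) : Decidable (Spec_triplet_sort release milestone compose out) := by unfold Spec_triplet_sort; infer_instance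

-- ===== CLAIM (what is proved, stated in full; the proofs are below) =====
def Claim_equal_triplet_sort : Prop := ∀ (release : String) (milestone : String) (compose : String), Dom_triplet_sort release milestone compose → Spec_triplet_sort release milestone compose (triplet_sort release milestone compose)

-- ===== LEMMAS AND PROOFS =====

-- A single full-string replace pass (the semantics of s.replace(k, r) for k ≠ ''),
-- written as a left-to-right scan so it composes with pvScan.
def scan1 (k r : List Char) : List Char → List Char
  | [] => []
  | c :: t =>
    if k.isPrefixOf (c :: t) then r ++ scan1 k r (t.drop (k.length - 1))
    else c :: scan1 k r t
termination_by s => s.length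
decreasing_by all_goals simp; try omega

theorem go_eq_scan1 (k r : List Char) (hk : k ≠ []) :
    ∀ (fuel : Nat) (l acc : List Char), l.length ≤ fuel →
      PySem.Chars.replace.go k r fuel l acc = acc.reverse ++ scan1 k r l := by
  intro fuel
  induction fuel with
  | zero =>
    intro l acc h
    have : l = [] := by cases l <;> simp_all
    subst this
    rw [PySem.Chars.replace.go.eq_def]
    simp [scan1]
  | succ n ih =>
    intro l acc h
    cases l with
    | nil => rw [PySem.Chars.replace.go.eq_def]; simp [scan1]
    | cons c t =>
      rw [PySem.Chars.replace.go.eq_def]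
      by_cases hp : k.isPrefixOf (c :: t) = true
      · simp only [hp, if_true]
        have hk1 : 0 < k.length := List.length_pos_of_ne_nil hk
        have hlen : (List.drop k.length (c :: t)).length ≤ n := by
          simp at h ⊢; omega
        rw [ih _ _ hlen]
        have hdrop : List.drop k.length (c :: t) = List.drop (k.length - 1) t := by
          cases hke : k with
          | nil => exact absurd hke hk
          | cons a b => simp
        rw [scan1, if_pos hp, hdrop]
        simp
      · simp only [hp]
        have hlen : t.length ≤ n := by simp at h; omega
        rw [ih _ _ hlen, scan1, if_neg hp]
        simp

theorem replace_eq_scan1 (s k r : List Char) (hk : k ≠ []) :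
    PySem.Chars.replace s k r = scan1 k r s := by
  rw [PySem.Chars.replace]
  simp [List.isEmpty_iff, hk]
  exact go_eq_scan1 k r hk s.length s [] le_rfl

theorem scan1_ne_nil (k r : List Char) (hr : r ≠ []) (s : List Char) (hs : s ≠ []) :
    scan1 k r s ≠ [] := by
  cases s with
  | nil => exact absurd rfl hs
  | cons c t =>
    rw [scan1]
    split
    · simp [hr]
    · simp

theorem pvScan_some {ps : List (List Char × List Char)} {c : Char} {t : List Char}
    {pr : List Char × List Char}
    (h : ps.find? (fun pr => pr.1.isPrefixOf (c :: t)) = some pr) :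
    pvScan ps (c :: t) = pr.2 ++ pvScan ps (t.drop (pr.1.length - 1)) := by
  rw [pvScan, h]

theorem pvScan_none {ps : List (List Char × List Char)} {c : Char} {t : List Char}
    (h : ps.find? (fun pr => pr.1.isPrefixOf (c :: t)) = none) :
    pvScan ps (c :: t) = c :: pvScan ps t := by
  rw [pvScan, h]

-- the facts about a replacement-pair list that make the sequential passes equal one scan
def pvGood (L : List (List Char × List Char)) : Prop :=
  (∀ pr ∈ L, pr.1 ≠ [] ∧ pr.2 ≠ []) ∧
  (∀ pr ∈ L, ∀ qr ∈ L, ∀ c ∈ pr.2, c ∉ qr.1) ∧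
  (∀ pr ∈ L, ∀ qr ∈ L, pr.1 <+: qr.1 → pr.1 = qr.1) ∧
  List.Pairwise (fun pr qr => ∀ i, i < qr.1.length → 0 < i →
    ¬ pr.1 <+: qr.1.drop i ∧ ¬ qr.1.drop i <+: pr.1) L

theorem pvGood_tail {p : List Char × List Char} {ps : List (List Char × List Char)}
    (h : pvGood (p :: ps)) : pvGood ps := by
  obtain ⟨h1, h2, h3, h4⟩ := h
  exact ⟨fun pr hm => h1 pr (List.mem_cons_of_mem _ hm),
         fun pr hm qr hq => h2 pr (List.mem_cons_of_mem _ hm) qr (List.mem_cons_of_mem _ hq),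
         fun pr hm qr hq => h3 pr (List.mem_cons_of_mem _ hm) qr (List.mem_cons_of_mem _ hq),
         (List.pairwise_cons.mp h4).2⟩

theorem prefix_append_cases {a b c : List Char} (h : a <+: b ++ c) : a <+: b ∨ b <+: a := by
  rcases le_total a.length b.length with hl | hl
  · exact Or.inl (List.prefix_of_prefix_length_le h (List.prefix_append b c) hl)
  · exact Or.inr (List.prefix_of_prefix_length_le (List.prefix_append b c) h hl)

-- a keyword (chars disjoint from the replacement text) found at the front of scan1's
-- output was already at the front of its input
theorem scan1_prefix_reflect (k r : List Char) (hr : r ≠ []) (t : List Char) :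
    ∀ k', (∀ c ∈ k', c ∉ r) → k' <+: scan1 k r t → k' <+: t := by
  induction t using scan1.induct k with
  | case1 =>
    intro k' _ h
    rw [scan1] at h
    simpa using h
  | case2 c t hp _ =>
    intro k' hd h
    rw [scan1, if_pos hp] at h
    cases k' with
    | nil => exact List.nil_prefix
    | cons d k'' =>
      cases hre : r with
      | nil => exact absurd hre hr
      | cons e r' =>
        rw [hre, List.cons_append, List.cons_prefix_cons] at h
        have hdr : d ∈ r := by rw [hre, h.1]; exact List.mem_cons_self
        exact absurd hdr (hd d List.mem_cons_self)
  | case3 c t hp ih =>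
    intro k' hd h
    rw [scan1, if_neg hp] at h
    cases k' with
    | nil => exact List.nil_prefix
    | cons d k'' =>
      rw [List.cons_prefix_cons] at h
      have := ih k'' (fun c hc => hd c (List.mem_cons_of_mem _ hc)) h.2
      rw [List.cons_prefix_cons]
      exact ⟨h.1, this⟩

-- pvScan copies a block whose chars start no key
theorem pvScan_append_block (ps : List (List Char × List Char)) (r : List Char)
    (h : ∀ qr ∈ ps, qr.1 ≠ [] ∧ ∀ c ∈ r, c ∉ qr.1) (X : List Char) :
    pvScan ps (r ++ X) = r ++ pvScan ps X := by
  induction r with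
  | nil => simp
  | cons c r' ih =>
    rw [List.cons_append]
    have hfind : ps.find? (fun pr => pr.1.isPrefixOf (c :: (r' ++ X))) = none := by
      rw [List.find?_eq_none]
      intro qr hq hpre
      obtain ⟨hne, hdisj⟩ := h qr hq
      rw [List.isPrefixOf_iff_prefix] at hpre
      cases hk : qr.1 with
      | nil => exact hne hk
      | cons d k'' =>
        rw [hk, List.cons_prefix_cons] at hpre
        exact hdisj c List.mem_cons_self (hk ▸ (hpre.1 ▸ List.mem_cons_self))
    rw [pvScan_none hfind]
    rw [ih (fun qr hq => ⟨(h qr hq).1, fun c hc => (h qr hq).2 c (List.mem_cons_of_mem _ hc)⟩)]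
    simp

-- scan1 walks over a stretch in which its key never matches
theorem scan1_skip (k r u v : List Char)
    (h : ∀ i < u.length, ¬ k <+: (u.drop i ++ v)) :
    scan1 k r (u ++ v) = u ++ scan1 k r v := by
  induction u with
  | nil => simp
  | cons c u' ih =>
    rw [List.cons_append, scan1]
    have h0 : ¬ k.isPrefixOf (c :: (u' ++ v)) = true := by
      rw [List.isPrefixOf_iff_prefix]
      have := h 0 (by simp)
      simpa using this
    rw [if_neg h0]
    rw [ih (fun i hi => by simpa using h (i + 1) (by simpa using hi))]
    simp

theorem find?_transfer {α : Type} (L : List α) (P Q : α → Bool) (e : α)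
    (h : L.find? P = some e) (hQ : Q e = true)
    (himp : ∀ x ∈ L, Q x = true → P x = true) : L.find? Q = some e := by
  induction L with
  | nil => simp at h
  | cons a L' ih =>
    by_cases hPa : P a = true
    · rw [List.find?_cons_of_pos hPa] at h
      injection h with h; subst h
      rw [List.find?_cons_of_pos hQ]
    · rw [List.find?_cons_of_neg hPa] at h
      have hQa : ¬ Q a = true := fun hq => hPa (himp a List.mem_cons_self hq)
      rw [List.find?_cons_of_neg hQa]
      exact ih h (fun x hx => himp x (List.mem_cons_of_mem _ hx))

-- main step: running one extra replace pass before the scan of the remaining pairs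
-- equals scanning with the pair added at the front
theorem pvScan_cons (p : List Char × List Char) (ps : List (List Char × List Char))
    (hg : pvGood (p :: ps)) :
    ∀ (n : Nat) (s : List Char), s.length ≤ n →
      pvScan ps (scan1 p.1 p.2 s) = pvScan (p :: ps) s := by
  obtain ⟨h1, h2, h3, h4⟩ := hg
  have hp1 : p.1 ≠ [] := (h1 p List.mem_cons_self).1
  have hp2 : p.2 ≠ [] := (h1 p List.mem_cons_self).2
  intro n
  induction n with
  | zero =>
    intro s hs
    have : s = [] := by cases s <;> simp_all
    subst this
    simp [scan1, pvScan]
  | succ n ih =>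
    intro s hs
    cases s with
    | nil => simp [scan1, pvScan]
    | cons c t =>
      by_cases hp : p.1.isPrefixOf (c :: t) = true
      · -- head pair matches: both sides emit p.2
        rw [scan1, if_pos hp]
        rw [pvScan_append_block ps p.2 (fun qr hq =>
          ⟨(h1 qr (List.mem_cons_of_mem _ hq)).1,
           fun ch hc => h2 p List.mem_cons_self qr (List.mem_cons_of_mem _ hq) ch hc⟩)]
        rw [ih (t.drop (p.1.length - 1)) (by simp at hs ⊢; omega)]
        have hfind : (p :: ps).find? (fun pr => pr.1.isPrefixOf (c :: t)) = some p := by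
          exact List.find?_cons_of_pos (p := fun pr : List Char × List Char => pr.1.isPrefixOf (c :: t)) hp
        rw [pvScan_some hfind]
      · cases hq : ps.find? (fun pr => pr.1.isPrefixOf (c :: t)) with
        | none =>
          -- no pair matches at this position
          rw [scan1, if_neg hp]
          have hnone : ps.find? (fun pr => pr.1.isPrefixOf (c :: scan1 p.1 p.2 t)) = none := by
            rw [List.find?_eq_none]
            intro qr hqr hpre
            rw [List.isPrefixOf_iff_prefix] at hpre
            cases hk : qr.1 with
            | nil => exact (h1 qr (List.mem_cons_of_mem _ hqr)).1 hk
            | cons d k'' =>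
              rw [hk, List.cons_prefix_cons] at hpre
              have hk'' : k'' <+: t := by
                apply scan1_prefix_reflect p.1 p.2 hp2 t k''
                · intro ch hc hcp
                  exact h2 p List.mem_cons_self qr (List.mem_cons_of_mem _ hqr) ch hcp
                    (hk ▸ List.mem_cons_of_mem _ hc)
                · exact hpre.2
              have : qr.1 <+: c :: t := by
                rw [hk]
                exact (List.cons_prefix_cons).mpr ⟨hpre.1, hk''⟩
              have := List.find?_eq_none.mp hq qr hqr
              rw [List.isPrefixOf_iff_prefix] at this
              exact this ‹qr.1 <+: c :: t›
          rw [pvScan_none hnone]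
          rw [ih t (by simp at hs; omega)]
          have hfind : (p :: ps).find? (fun pr => pr.1.isPrefixOf (c :: t)) = none := by
            rw [List.find?_cons_of_neg (p := fun pr : List Char × List Char => pr.1.isPrefixOf (c :: t)) hp]; exact hq
          rw [pvScan_none hfind]
        | some qr =>
          -- a later pair qr is the first match
          have hqm : qr ∈ ps := List.mem_of_find?_eq_some hq
          have hqpre : qr.1 <+: c :: t := by
            have := List.find?_some hq
            rwa [List.isPrefixOf_iff_prefix] at this
          have hq1 : qr.1 ≠ [] := (h1 qr (List.mem_cons_of_mem _ hqm)).1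
          obtain ⟨rest, hrest⟩ := hqpre
          have hov := (List.pairwise_cons.mp h4).1 qr hqm
          have hskip : scan1 p.1 p.2 (qr.1 ++ rest) = qr.1 ++ scan1 p.1 p.2 rest := by
            apply scan1_skip
            intro i hi hpre
            rcases Nat.eq_zero_or_pos i with h0 | h0
            · subst h0
              rw [List.drop_zero, hrest] at hpre
              rw [List.isPrefixOf_iff_prefix] at hp
              exact hp hpre
            · rcases prefix_append_cases hpre with hc1 | hc1
              · exact (hov i hi h0).1 hc1
              · exact (hov i hi h0).2 hc1
          -- find? on the partly rewritten string still picks qr first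
          have hfind2 : ps.find? (fun pr => pr.1.isPrefixOf (qr.1 ++ scan1 p.1 p.2 rest))
              = some qr := by
            apply find?_transfer ps _ _ qr hq
            · rw [List.isPrefixOf_iff_prefix]; exact List.prefix_append _ _
            · intro x hx hxq
              rw [List.isPrefixOf_iff_prefix] at hxq ⊢
              rcases prefix_append_cases hxq with hc1 | hc1
              · exact hc1.trans (hrest ▸ List.prefix_append qr.1 rest)
              · have := h3 qr (List.mem_cons_of_mem _ hqm) x (List.mem_cons_of_mem _ hx) hc1
                rw [← this, ← hrest]
                exact List.prefix_append _ _
          have hrlen : rest.length ≤ n := by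
            have hlen : (c :: t).length = qr.1.length + rest.length := by
              rw [← hrest]; simp
            have hq1l : 0 < qr.1.length := List.length_pos_of_ne_nil hq1
            simp at hs hlen; omega
          obtain ⟨d, k'', hk⟩ : ∃ d k'', qr.1 = d :: k'' := by
            cases hkc : qr.1 with
            | nil => exact absurd hkc hq1
            | cons a b => exact ⟨a, b, rfl⟩
          have hdrop1 : qr.1.length - 1 = k''.length := by rw [hk]; simp
          have hL : pvScan ps (scan1 p.1 p.2 (c :: t)) = qr.2 ++ pvScan (p :: ps) rest := by
            rw [← hrest, hskip]
            have hfind2' := hfind2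
            rw [hk, List.cons_append] at hfind2'
            rw [hk, List.cons_append, pvScan_some hfind2', hdrop1, List.drop_left]
            rw [ih rest hrlen]
          have htdrop : t.drop (qr.1.length - 1) = rest := by
            have hteq : t = k'' ++ rest := by
              have h2' := hrest
              rw [hk] at h2'
              simp at h2'
              exact h2'.2.symm
            rw [hteq, hdrop1, List.drop_left]
          have hfind : (p :: ps).find? (fun pr => pr.1.isPrefixOf (c :: t)) = some qr := by
            rw [List.find?_cons_of_neg (p := fun pr : List Char × List Char => pr.1.isPrefixOf (c :: t)) hp]
            exact hq
          rw [hL, pvScan_some hfind, htdrop]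

theorem pvScan_nil_pairs : ∀ s : List Char, pvScan [] s = s := by
  intro s
  induction s with
  | nil => simp [pvScan]
  | cons c t ih => rw [pvScan]; simp [ih]

-- the sequential passes over a good pair list equal the single scan
theorem foldl_scan1_eq_pvScan :
    ∀ (ps : List (List Char × List Char)), pvGood ps → ∀ s : List Char,
      ps.foldl (fun m pr => scan1 pr.1 pr.2 m) s = pvScan ps s := by
  intro ps
  induction ps with
  | nil => intro _ s; simpa using (pvScan_nil_pairs s).symm
  | cons p ps ih =>
    intro hg s
    rw [List.foldl_cons]
    rw [ih (pvGood_tail hg) (scan1 p.1 p.2 s)]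
    exact pvScan_cons p ps hg s.length s le_rfl

theorem ofList_eq_empty_iff (l : List Char) : String.ofList l = "" ↔ l = [] := by
  constructor
  · intro h
    have := congrArg String.toList h
    rwa [String.toList_ofList] at this
  · intro h; subst h; decide

-- A's string-level fold (with its in-loop sentinel test) on a NONEMPTY string is the
-- char-level fold of scan1 passes: the sentinel branch never fires
theorem foldl_replace_eq (sent : String) :
    ∀ (L : List (String × String)),
      pvGood (L.map (fun pr => (pr.1.toList, pr.2.toList))) →
      ∀ m : String, m ≠ "" →
        L.foldl (fun m pr =>
            let m' := PySem.Str.replace m pr.1 pr.2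
            if m' = "" then sent else m') m
          = String.ofList ((L.map (fun pr => (pr.1.toList, pr.2.toList))).foldl
              (fun x pr => scan1 pr.1 pr.2 x) m.toList) := by
  intro L
  induction L with
  | nil => intro _ m _; simp [String.ofList_toList]
  | cons pr L' ih =>
    intro hg m hm
    have hk : pr.1.toList ≠ [] :=
      (hg.1 (pr.1.toList, pr.2.toList) (by simp)).1
    have hr : pr.2.toList ≠ [] :=
      (hg.1 (pr.1.toList, pr.2.toList) (by simp)).2
    have hml : m.toList ≠ [] := fun h => hm (by
      have := congrArg String.ofList h
      rwa [String.ofList_toList] at this)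
    have hrepl : PySem.Str.replace m pr.1 pr.2
        = String.ofList (scan1 pr.1.toList pr.2.toList m.toList) := by
      rw [PySem.Str.replace, replace_eq_scan1 _ _ _ hk]
    have hne : PySem.Str.replace m pr.1 pr.2 ≠ "" := by
      rw [hrepl]
      rw [Ne, ofList_eq_empty_iff]
      exact scan1_ne_nil _ _ hr _ hml
    rw [List.foldl_cons]
    simp only []
    rw [if_neg hne]
    rw [ih (pvGood_tail hg) _ hne]
    rw [List.map_cons, List.foldl_cons]
    rw [hrepl, String.toList_ofList]

-- Boolean form of pvGood, so the two concrete pair lists can be checked by `decide`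
def pvOver (pr qr : List Char × List Char) : Bool :=
  (List.range qr.1.length).all fun i =>
    (i == 0) || (!(List.isPrefixOf pr.1 (qr.1.drop i)) && !(List.isPrefixOf (qr.1.drop i) pr.1))

def pvNoOverlap : List (List Char × List Char) → Bool
  | [] => true
  | p :: ps => ps.all (pvOver p) && pvNoOverlap ps

theorem pvNoOverlap_pairwise : ∀ L, pvNoOverlap L = true →
    L.Pairwise (fun pr qr => ∀ i, i < qr.1.length → 0 < i →
      ¬ pr.1 <+: qr.1.drop i ∧ ¬ qr.1.drop i <+: pr.1) := by
  intro L
  induction L with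
  | nil => intro _; exact List.Pairwise.nil
  | cons p ps ih =>
    intro h
    rw [pvNoOverlap, Bool.and_eq_true] at h
    refine List.Pairwise.cons ?_ (ih h.2)
    intro qr hqr i hi h0
    have := List.all_eq_true.mp h.1 qr hqr
    rw [pvOver, List.all_eq_true] at this
    have h2 := this i (List.mem_range.mpr hi)
    have hne : (i == 0) = false := by simp; omega
    rw [hne, Bool.false_or, Bool.and_eq_true] at h2
    have h21 := h2.1
    have h22 := h2.2
    simp only [Bool.not_eq_true'] at h21 h22
    constructor
    · rw [← List.isPrefixOf_iff_prefix]
      simp [h21]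
    · rw [← List.isPrefixOf_iff_prefix]
      simp [h22]

theorem pvGood_of_b (L : List (List Char × List Char))
    (hb1 : (L.all fun pr => !pr.1.isEmpty && !pr.2.isEmpty) = true)
    (hb2 : (L.all fun pr => L.all fun qr => pr.2.all fun c => !qr.1.contains c) = true)
    (hb3 : (L.all fun pr => L.all fun qr => !(List.isPrefixOf pr.1 qr.1) || pr.1 == qr.1) = true)
    (hb4 : pvNoOverlap L = true) : pvGood L := by
  refine ⟨?_, ?_, ?_, pvNoOverlap_pairwise L hb4⟩
  · intro pr hpr
    have := List.all_eq_true.mp hb1 pr hpr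
    rw [Bool.and_eq_true] at this
    constructor
    · simpa [List.isEmpty_iff] using this.1
    · simpa [List.isEmpty_iff] using this.2
  · intro pr hpr qr hqr c hc
    have := List.all_eq_true.mp (List.all_eq_true.mp (List.all_eq_true.mp hb2 pr hpr) qr hqr) c hc
    simpa using this
  · intro pr hpr qr hqr hpre
    have := List.all_eq_true.mp (List.all_eq_true.mp hb3 pr hpr) qr hqr
    rw [Bool.or_eq_true] at this
    rcases this with hc | hc
    · exfalso
      rw [← List.isPrefixOf_iff_prefix] at hpre
      simp [hpre] at hc
    · simpa using hc

theorem pvGood_milestone : pvGood pvMilestonePairsC :=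
  pvGood_of_b _ (by decide) (by decide) (by decide) (by decide)

theorem pvGood_compose : pvGood pvComposePairsC :=
  pvGood_of_b _ (by decide) (by decide) (by decide) (by decide)

set_option maxRecDepth 10000 in
theorem milestone_field (m : String) :
    pvMilestonePairs.foldl (fun m pr =>
        let m := PySem.Str.replace m pr.1 pr.2
        if m = "" then "f800" else m) m
      = if m = "" then "f800" else String.ofList (pvScan pvMilestonePairsC m.toList) := by
  by_cases hm : m = ""
  · subst hm; decide
  · rw [if_neg hm]
    rw [foldl_replace_eq "f800" pvMilestonePairs pvGood_milestone m hm]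
    rw [show pvMilestonePairs.map (fun pr => (pr.1.toList, pr.2.toList)) = pvMilestonePairsC from rfl]
    rw [foldl_scan1_eq_pvScan pvMilestonePairsC pvGood_milestone]

theorem compose_field (c : String) :
    pvComposePairs.foldl (fun c pr =>
        let c := PySem.Str.replace c pr.1 pr.2
        if c = "" then "999" else c) c
      = if c = "" then "999" else String.ofList (pvScan pvComposePairsC c.toList) := by
  by_cases hc : c = ""
  · subst hc; decide
  · rw [if_neg hc]
    rw [foldl_replace_eq "999" pvComposePairs pvGood_compose c hc]
    rw [show pvComposePairs.map (fun pr => (pr.1.toList, pr.2.toList)) = pvComposePairsC from rfl]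
    rw [foldl_scan1_eq_pvScan pvComposePairsC pvGood_compose]

-- ===== VERDICT (by name: the statement is the Claim_ definition above) =====
theorem triplet_sort_spec : Claim_equal_triplet_sort := by
  intro release milestone compose _
  unfold Spec_triplet_sort triplet_sort triplet_sort_alt
  simp only []
  rw [milestone_field, compose_field]
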